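-- pv_equiv track=rewrite | github.com/mohammadrezaetaati/mapsa-precamp | Noroz/Problem ـSolving/3.py | well_defined
-- ===== SOURCE A (Python) =====
-- def well_defined(str):
--     for chr in range(len(str)):
--         if str[chr]=='?' and chr!=0:
--             if str[chr-1]=='0':
--                 str=str.replace('?','1',1)
--             else:
--                 str=str.replace('?','0',1)
--         elif str[chr]=='?' and chr==0:
--             if str[chr+1]=='0':
--                 str=str.replace('?','1',1)
--             else:
--                 str=str.replace('?','0',1)
--     for i in range(len(str)-1):
--         if str[i]==str[i+1]:
--             return 'khosh Tarif nist'
--             break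
--     else:
--         return 'khosh Tarif hast'
-- ===== SOURCE B (Python) =====
-- def well_defined(str):
--     s = str
--     if not s:
--         return 'khosh Tarif hast'
--     prev = s[0]
--     if prev == '?':
--         prev = '1' if s[1] == '0' else '0'
--     ok = True
--     for c in s[1:]:
--         cur = ('1' if prev == '0' else '0') if c == '?' else c
--         if cur == prev:
--             ok = False
--         prev = cur
--     return 'khosh Tarif hast' if ok else 'khosh Tarif nist'
-- ===== Notes on version B (the rewrite author's own statement) =====
-- stated objective: faster
-- what changed: A repeatedly calls str.replace('?',c,1), rebuilding and rescanning the string for every '?', then does a second indexing pass; B is a single left-to-right pass that tracks only the previous (already filled) character, fusing the fill and the adjacent-equal check with no string rebuilds.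
-- outside the precondition, e.g. on well_defined('?'): A raises IndexError, B raises IndexError
import Mathlib
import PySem

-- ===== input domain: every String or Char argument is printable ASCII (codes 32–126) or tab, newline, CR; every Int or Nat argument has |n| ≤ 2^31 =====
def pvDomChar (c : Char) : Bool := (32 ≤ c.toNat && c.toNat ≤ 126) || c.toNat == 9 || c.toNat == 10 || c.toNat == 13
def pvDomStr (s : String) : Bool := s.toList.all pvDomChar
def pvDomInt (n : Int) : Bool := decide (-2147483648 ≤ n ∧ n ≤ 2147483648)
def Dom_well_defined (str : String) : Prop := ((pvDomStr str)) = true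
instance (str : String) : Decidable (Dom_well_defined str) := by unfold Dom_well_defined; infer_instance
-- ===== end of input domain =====

-- B replaces A's repeated str.replace('?',c,1) rescans by one fused fill+check pass tracking the previous character (measured faster, asymptotic mechanism).

-- ===== PORT A =====
-- str.replace('?', c, 1): replace the first occurrence of '?' (exact for a 1-char pattern and count 1)
def pvReplaceFirst (l : List Char) (c : Char) : List Char :=
  match l with
  | [] => []
  | x :: xs => if x = '?' then c :: xs else x :: pvReplaceFirst xs c

-- first loop: 'for chr in range(len(str)): …' with the string as mutable state;
-- str[chr] and str[chr-1] are always in range; str[chr+1] is out of range only on the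
-- excluded input "?" (Python: IndexError), where pyGetD's default is returned instead.
def pvLoopA (n : Nat) (i : Nat) (t : List Char) : List Char :=
  if _h : i < n then
    let t' :=
      if PySem.List.pyGetD t (i : Int) ' ' = '?' ∧ i ≠ 0 then
        (if PySem.List.pyGetD t ((i : Int) - 1) ' ' = '0' then pvReplaceFirst t '1'
         else pvReplaceFirst t '0')
      else if PySem.List.pyGetD t (i : Int) ' ' = '?' ∧ i = 0 then
        (if PySem.List.pyGetD t ((i : Int) + 1) ' ' = '0' then pvReplaceFirst t '1'
         else pvReplaceFirst t '0')
      else t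
    pvLoopA n (i + 1) t'
  else t
  termination_by n - i

-- second loop: 'for i in range(len(str)-1): … else: …' with early return
def pvCheckA (t : List Char) (n : Nat) (i : Nat) : String :=
  if _h : i < n - 1 then
    if PySem.List.pyGetD t (i : Int) ' ' = PySem.List.pyGetD t ((i : Int) + 1) ' ' then
      "khosh Tarif nist"
    else pvCheckA t n (i + 1)
  else "khosh Tarif hast"
  termination_by n - 1 - i

def well_defined (str : String) : String :=
  let t := pvLoopA str.toList.length 0 str.toList
  pvCheckA t t.length 0

-- ===== PORT B =====
-- single pass over s[1:], carrying the previous (already filled) character and the check flag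
def pvLoopB (prev : Char) (ok : Bool) (cs : List Char) : Bool :=
  match cs with
  | [] => ok
  | c :: rest =>
    let cur := if c = '?' then (if prev = '0' then '1' else '0') else c
    pvLoopB cur (if cur = prev then false else ok) rest

-- s[1] is out of range only on the excluded input "?" (Python: IndexError), where pyGetD's default is returned.
def well_defined_alt (str : String) : String :=
  match str.toList with
  | [] => "khosh Tarif hast"
  | c0 :: rest =>
    let first := if c0 = '?' then (if PySem.List.pyGetD str.toList 1 ' ' = '0' then '1' else '0') else c0
    if pvLoopB first true rest then "khosh Tarif hast" else "khosh Tarif nist"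

-- ===== PRECONDITION & SPEC =====
-- Pre_ excludes only the single string "?", on which Python A (and Python B) raise IndexError reading str[1].
def Pre_well_defined (str : String) : Prop := str ≠ "?"
instance (str : String) : Decidable (Pre_well_defined str) := by unfold Pre_well_defined; infer_instance
def pvWitness_well_defined : String := "0?1"

def Spec_well_defined (str : String) (out : String) : Prop := out = well_defined_alt str
instance (str : String) (out : String) : Decidable (Spec_well_defined str out) := by unfold Spec_well_defined; infer_instance

-- ===== CLAIM (what is proved, stated in full; the proofs are below) =====
def Claim_equal_well_defined : Prop := ∀ (str : String), Dom_well_defined str → Pre_well_defined str → Spec_well_defined str (well_defined str)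

-- ===== LEMMAS AND PROOFS =====

-- the fill rule: a '?' becomes '1' after a '0', else '0'
def pvStep (prev c : Char) : Char := if c = '?' then (if prev = '0' then '1' else '0') else c

-- the filled tail, given the (already filled) previous character
def pvFillRest (prev : Char) : List Char → List Char
  | [] => []
  | c :: cs => pvStep prev c :: pvFillRest (pvStep prev c) cs

-- the first filled character
def pvFirst (l : List Char) : Char :=
  match l with
  | [] => ' '
  | c0 :: _ => if c0 = '?' then (if PySem.List.pyGetD l 1 ' ' = '0' then '1' else '0') else c0

-- the whole filled string
def pvFilled (l : List Char) : List Char :=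
  match l with
  | [] => []
  | _ :: rest => pvFirst l :: pvFillRest (pvFirst l) rest

-- no two adjacent equal characters
def pvAdjOk : List Char → Bool
  | a :: b :: r => if a = b then false else pvAdjOk (b :: r)
  | _ => true

theorem pvAdjOk_cons_cons (a b : Char) (r : List Char) :
    pvAdjOk (a :: b :: r) = if a = b then false else pvAdjOk (b :: r) := rfl

theorem pvFillRest_length (prev : Char) (cs : List Char) :
    (pvFillRest prev cs).length = cs.length := by
  induction cs generalizing prev with
  | nil => rfl
  | cons c cs ih => simp [pvFillRest, ih]

theorem pvFilled_length (l : List Char) : (pvFilled l).length = l.length := by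
  cases l with
  | nil => rfl
  | cons c0 rest => simp [pvFilled, pvFillRest_length]

theorem pvStep_ne_q (prev c : Char) : pvStep prev c ≠ '?' := by
  unfold pvStep
  split_ifs with h1 h2
  · decide
  · decide
  · exact h1

theorem pvFirst_cons (c0 : Char) (rest : List Char) :
    pvFirst (c0 :: rest)
      = (if c0 = '?' then (if PySem.List.pyGetD (c0 :: rest) 1 ' ' = '0' then '1' else '0') else c0) := rfl

theorem pvFirst_ne_q (c0 : Char) (rest : List Char) : pvFirst (c0 :: rest) ≠ '?' := by
  rw [pvFirst_cons]
  split_ifs with h1 h2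
  · decide
  · decide
  · exact h1

theorem pvFillRest_no_q (prev : Char) (cs : List Char) : '?' ∉ pvFillRest prev cs := by
  induction cs generalizing prev with
  | nil => simp [pvFillRest]
  | cons c cs ih =>
    simp only [pvFillRest, List.mem_cons]
    rintro (h | h)
    · exact pvStep_ne_q prev c h.symm
    · exact ih _ h

theorem pvFilled_no_q (l : List Char) : '?' ∉ pvFilled l := by
  cases l with
  | nil => simp [pvFilled]
  | cons c0 rest =>
    simp only [pvFilled, List.mem_cons]
    rintro (h | h)
    · exact pvFirst_ne_q c0 rest h.symm
    · exact pvFillRest_no_q _ _ h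

theorem pvReplaceFirst_spec (pre suf : List Char) (c : Char) (hpre : '?' ∉ pre) :
    pvReplaceFirst (pre ++ '?' :: suf) c = pre ++ c :: suf := by
  induction pre with
  | nil => simp [pvReplaceFirst]
  | cons x xs ih =>
    simp only [List.mem_cons, not_or] at hpre
    have hx : ¬ x = '?' := fun h => hpre.1 h.symm
    simp only [List.cons_append, pvReplaceFirst, if_neg hx]
    rw [ih hpre.2]

-- the recurrence satisfied by the filled tail
theorem pvFillRest_getElem (prev : Char) (cs : List Char) (i : Nat)
    (h : i + 1 < (prev :: pvFillRest prev cs).length)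
    (h' : i < (prev :: pvFillRest prev cs).length) :
    (prev :: pvFillRest prev cs)[i + 1] =
      pvStep ((prev :: pvFillRest prev cs)[i]) (cs[i]'(by simp [pvFillRest_length] at h; omega)) := by
  induction cs generalizing prev i with
  | nil => simp [pvFillRest] at h
  | cons c cs ih =>
    cases i with
    | zero => simp [pvFillRest]
    | succ j =>
      have h2 : j + 1 < (pvStep prev c :: pvFillRest (pvStep prev c) cs).length := by
        simp only [pvFillRest, List.length_cons] at h ⊢
        omega
      have h2' : j < (pvStep prev c :: pvFillRest (pvStep prev c) cs).length := by
        simp only [List.length_cons] at h2 ⊢; omega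
      have key := ih (pvStep prev c) j h2 h2'
      simp only [pvFillRest, List.getElem_cons_succ] at key ⊢
      rw [key]

-- recurrence for pvFilled at positions ≥ 1
theorem pvFilled_getElem_succ (l : List Char) (i : Nat) (h : i + 1 < l.length) :
    (pvFilled l)[i + 1]'(by rw [pvFilled_length]; omega) =
      pvStep ((pvFilled l)[i]'(by rw [pvFilled_length]; omega)) (l[i + 1]) := by
  cases l with
  | nil => simp at h
  | cons c0 rest =>
    have hir : i < rest.length := by simp at h; omega
    have h1 : i + 1 < (pvFirst (c0 :: rest) :: pvFillRest (pvFirst (c0 :: rest)) rest).length := by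
      simp [pvFillRest_length]; omega
    have h2 : i < (pvFirst (c0 :: rest) :: pvFillRest (pvFirst (c0 :: rest)) rest).length := by
      simp [pvFillRest_length]; omega
    have key := pvFillRest_getElem (pvFirst (c0 :: rest)) rest i h1 h2
    simp only [pvFilled]
    rw [key]
    congr 1

theorem pvFilled_getElem_pred (l : List Char) (k : Nat) (h1 : 1 ≤ k) (h : k < l.length) :
    (pvFilled l)[k]'(by rw [pvFilled_length]; omega) =
      pvStep ((pvFilled l)[k - 1]'(by rw [pvFilled_length]; omega)) (l[k]) := by
  obtain ⟨j, rfl⟩ : ∃ j, k = j + 1 := ⟨k - 1, by omega⟩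
  simp only [Nat.add_sub_cancel]
  exact pvFilled_getElem_succ l j h

theorem pvFilled_getElem_zero (c0 : Char) (rest : List Char) :
    (pvFilled (c0 :: rest))[0]'(by simp [pvFilled_length]) = pvFirst (c0 :: rest) := by
  simp [pvFilled]

-- a non-'?' position keeps its character
theorem pvFilled_getElem_not_q (l : List Char) (i : Nat) (h : i < l.length) (hq : l[i] ≠ '?') :
    (pvFilled l)[i]'(by rw [pvFilled_length]; omega) = l[i] := by
  cases l with
  | nil => simp at h
  | cons c0 rest =>
    cases i with
    | zero =>
      rw [pvFilled_getElem_zero c0 rest, pvFirst_cons]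
      simp only [List.getElem_cons_zero] at hq ⊢
      rw [if_neg hq]
    | succ j =>
      rw [pvFilled_getElem_succ (c0 :: rest) j h]
      unfold pvStep
      rw [if_neg hq]

-- main invariant of A's first loop: the state after k steps is the filled prefix plus the raw suffix
theorem pvLoopA_inv (l : List Char) :
    ∀ k, k ≤ l.length →
      pvLoopA l.length k (List.take k (pvFilled l) ++ List.drop k l) = pvFilled l := by
  intro k hk
  induction hn : l.length - k generalizing k with
  | zero =>
    have hk' : k = l.length := by omega
    subst hk'
    rw [List.drop_of_length_le (le_refl _),
        List.take_of_length_le (by rw [pvFilled_length]), List.append_nil]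
    rw [pvLoopA]
    simp
  | succ m ih =>
    have hkl : k < l.length := by omega
    have hFlen : (pvFilled l).length = l.length := pvFilled_length l
    have htake : (List.take k (pvFilled l)).length = k := by
      rw [List.length_take]; omega
    have hdrop : List.drop k l = l[k] :: List.drop (k + 1) l :=
      List.drop_eq_getElem_cons hkl
    -- the current character
    have htk : PySem.List.pyGetD (List.take k (pvFilled l) ++ List.drop k l) (k : Int) ' ' = l[k] := by
      rw [PySem.List.pyGetD_natCast, List.getD_eq_getElem?_getD, hdrop,
          List.getElem?_append_right (by omega), htake]
      simp [List.getElem?_eq_getElem hkl]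
    -- the previous character (k ≥ 1)
    have htk1 : ∀ _ : 1 ≤ k,
        PySem.List.pyGetD (List.take k (pvFilled l) ++ List.drop k l) ((k : Int) - 1) ' '
          = (pvFilled l)[k - 1]'(by omega) := by
      intro h1
      have hcast : (k : Int) - 1 = ((k - 1 : Nat) : Int) := by omega
      rw [hcast, PySem.List.pyGetD_natCast, List.getD_eq_getElem?_getD,
          List.getElem?_append_left (by omega), List.getElem?_take_of_lt (by omega)]
      simp [List.getElem?_eq_getElem (show k - 1 < (pvFilled l).length by omega)]
    -- the next state equals the invariant state for k+1
    have hstep :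
        (if PySem.List.pyGetD (List.take k (pvFilled l) ++ List.drop k l) (k : Int) ' ' = '?' ∧ k ≠ 0 then
          (if PySem.List.pyGetD (List.take k (pvFilled l) ++ List.drop k l) ((k : Int) - 1) ' ' = '0' then
            pvReplaceFirst (List.take k (pvFilled l) ++ List.drop k l) '1'
           else pvReplaceFirst (List.take k (pvFilled l) ++ List.drop k l) '0')
        else if PySem.List.pyGetD (List.take k (pvFilled l) ++ List.drop k l) (k : Int) ' ' = '?' ∧ k = 0 then
          (if PySem.List.pyGetD (List.take k (pvFilled l) ++ List.drop k l) ((k : Int) + 1) ' ' = '0' then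
            pvReplaceFirst (List.take k (pvFilled l) ++ List.drop k l) '1'
           else pvReplaceFirst (List.take k (pvFilled l) ++ List.drop k l) '0')
        else (List.take k (pvFilled l) ++ List.drop k l))
        = List.take (k + 1) (pvFilled l) ++ List.drop (k + 1) l := by
      have hnoq : '?' ∉ List.take k (pvFilled l) :=
        fun hmem => pvFilled_no_q l (List.mem_of_mem_take hmem)
      have htake1 : List.take (k + 1) (pvFilled l)
          = List.take k (pvFilled l) ++ [(pvFilled l)[k]'(by omega)] := by
        rw [List.take_add_one, List.getElem?_eq_getElem (show k < (pvFilled l).length by omega)]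
        rfl
      by_cases hq : l[k] = '?'
      · by_cases hk0 : k = 0
        · -- k = 0, l[0] = '?': fill from the character to the right
          subst hk0
          obtain ⟨c0, rest, rfl⟩ : ∃ c0 rest, l = c0 :: rest := by
            cases l with
            | nil => simp at hkl
            | cons a b => exact ⟨a, b, rfl⟩
          simp only [List.getElem_cons_zero] at hq
          subst hq
          rw [if_neg (by simp), if_pos ⟨by simpa using htk, rfl⟩]
          simp only [List.take_zero, List.nil_append, List.drop_zero, Nat.cast_zero, zero_add]
          rw [show pvReplaceFirst ('?' :: rest) '1' = '1' :: rest by simp [pvReplaceFirst],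
              show pvReplaceFirst ('?' :: rest) '0' = '0' :: rest by simp [pvReplaceFirst],
              show List.take 1 (pvFilled ('?' :: rest)) = [pvFirst ('?' :: rest)] from rfl,
              show List.drop 1 ('?' :: rest) = rest from rfl,
              pvFirst_cons]
          split_ifs <;> simp_all
        · -- k ≥ 1, l[k] = '?': fill from the already-filled character to the left
          have h1 : 1 ≤ k := by omega
          rw [if_pos (by exact ⟨by simp [htk, hq], hk0⟩)]
          have hFk : (pvFilled l)[k]'(by omega) =
              (if (pvFilled l)[k - 1]'(by omega) = '0' then '1' else '0') := by
            rw [pvFilled_getElem_pred l k h1 hkl]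
            unfold pvStep
            rw [if_pos hq]
          rw [htk1 h1]
          have hsplit : List.take k (pvFilled l) ++ List.drop k l
              = List.take k (pvFilled l) ++ '?' :: List.drop (k + 1) l := by
            rw [hdrop, hq]
          rw [htake1]
          split_ifs with h0
          · rw [hsplit, pvReplaceFirst_spec _ _ _ hnoq, hFk, if_pos h0]
            simp
          · rw [hsplit, pvReplaceFirst_spec _ _ _ hnoq, hFk, if_neg h0]
            simp
      · -- l[k] ≠ '?': no change, and the filled string keeps l[k]
        rw [if_neg (by simp [htk, hq]), if_neg (by simp [htk, hq])]
        rw [htake1, hdrop, pvFilled_getElem_not_q l k hkl hq]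
        simp
    rw [pvLoopA, dif_pos hkl]
    simp only [hstep]
    exact ih (k + 1) (by omega) (by omega)

-- the second loop of A is the adjacent-equal check on the suffix from i
theorem pvCheckA_drop (t : List Char) :
    ∀ k, pvCheckA t t.length k
      = (if pvAdjOk (t.drop k) then "khosh Tarif hast" else "khosh Tarif nist") := by
  intro k
  induction hn : t.length - 1 - k generalizing k with
  | zero =>
    rw [pvCheckA, dif_neg (by omega)]
    have hlen : (t.drop k).length ≤ 1 := by simp; omega
    have : pvAdjOk (t.drop k) = true := by
      cases h : t.drop k with
      | nil => rfl
      | cons a r =>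
        cases r with
        | nil => rfl
        | cons b r2 => rw [h] at hlen; simp at hlen
    rw [this]
    simp
  | succ m ih =>
    have hk : k < t.length - 1 := by omega
    have hk1 : k + 1 < t.length := by omega
    rw [pvCheckA, dif_pos hk]
    have e1 : PySem.List.pyGetD t (k : Int) ' ' = t[k]'(by omega) := by
      rw [PySem.List.pyGetD_natCast, List.getD_eq_getElem?_getD,
          List.getElem?_eq_getElem (show k < t.length by omega)]
      rfl
    have e2 : PySem.List.pyGetD t ((k : Int) + 1) ' ' = t[k + 1]'hk1 := by
      have hcast : (k : Int) + 1 = ((k + 1 : Nat) : Int) := by omega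
      rw [hcast, PySem.List.pyGetD_natCast, List.getD_eq_getElem?_getD,
          List.getElem?_eq_getElem hk1]
      rfl
    have hdropk : t.drop k = t[k]'(by omega) :: t[k + 1]'hk1 :: t.drop (k + 2) := by
      rw [List.drop_eq_getElem_cons (show k < t.length by omega)]
      congr 1
      rw [List.drop_eq_getElem_cons hk1]
    have hdropk1 : t.drop (k + 1) = t[k + 1]'hk1 :: t.drop (k + 2) :=
      List.drop_eq_getElem_cons hk1
    rw [e1, e2, hdropk]
    by_cases heq : t[k]'(by omega) = t[k + 1]'hk1
    · rw [if_pos heq]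
      rw [show pvAdjOk (t[k]'(by omega) :: t[k + 1]'hk1 :: t.drop (k + 2)) = false by
        rw [pvAdjOk_cons_cons, if_pos heq]]
      simp
    · rw [if_neg heq]
      have := ih (k + 1) (by omega)
      rw [hdropk1] at this
      rw [this]
      rw [show pvAdjOk (t[k]'(by omega) :: t[k + 1]'hk1 :: t.drop (k + 2))
            = pvAdjOk (t[k + 1]'hk1 :: t.drop (k + 2)) by
        rw [pvAdjOk_cons_cons, if_neg heq]]
-- B's fused loop computes the adjacent-equal check of the filled string
theorem pvLoopB_spec (cs : List Char) :
    ∀ prev ok, pvLoopB prev ok cs = (ok && pvAdjOk (prev :: pvFillRest prev cs)) := by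
  induction cs with
  | nil =>
    intro prev ok
    simp [pvLoopB, pvFillRest, pvAdjOk]
  | cons c cs ih =>
    intro prev ok
    show pvLoopB (if c = '?' then (if prev = '0' then '1' else '0') else c)
        (if (if c = '?' then (if prev = '0' then '1' else '0') else c) = prev then false else ok) cs
      = (ok && pvAdjOk (prev :: pvFillRest prev (c :: cs)))
    rw [show (if c = '?' then (if prev = '0' then '1' else '0') else c) = pvStep prev c from rfl]
    rw [ih]
    rw [show pvFillRest prev (c :: cs) = pvStep prev c :: pvFillRest (pvStep prev c) cs from rfl]
    rw [show pvAdjOk (prev :: pvStep prev c :: pvFillRest (pvStep prev c) cs)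
          = (if prev = pvStep prev c then false else pvAdjOk (pvStep prev c :: pvFillRest (pvStep prev c) cs)) from rfl]
    by_cases h : pvStep prev c = prev
    · rw [if_pos h, if_pos h.symm]
      simp
    · rw [if_neg h, if_neg (fun h' => h h'.symm)]

-- ===== VERDICT (by name: the statement is the Claim_ definition above) =====
theorem well_defined_spec : Claim_equal_well_defined := by
  intro str _ _
  show well_defined str = well_defined_alt str
  have hA : pvLoopA str.toList.length 0 str.toList = pvFilled str.toList := by
    have := pvLoopA_inv str.toList 0 (Nat.zero_le _)
    simpa using this
  have hW : well_defined str = pvCheckA (pvFilled str.toList) (pvFilled str.toList).length 0 := by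
    unfold well_defined
    rw [hA]
  rw [hW, pvCheckA_drop (pvFilled str.toList) 0, List.drop_zero]
  cases hl : str.toList with
  | nil =>
    have halt : well_defined_alt str = "khosh Tarif hast" := by
      unfold well_defined_alt
      rw [hl]
    rw [halt]
    simp [pvFilled, pvAdjOk]
  | cons c0 rest =>
    have halt : well_defined_alt str
        = (if pvLoopB (pvFirst (c0 :: rest)) true rest then "khosh Tarif hast"
           else "khosh Tarif nist") := by
      unfold well_defined_alt
      rw [hl, pvFirst_cons]
    rw [halt,
        show pvFilled (c0 :: rest) = pvFirst (c0 :: rest) :: pvFillRest (pvFirst (c0 :: rest)) rest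
          from rfl,
        pvLoopB_spec rest (pvFirst (c0 :: rest)) true]
    simp only [Bool.true_and]
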